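-- pv_equiv track=rewrite | github.com/ZenSyntax/crawler-360DOC | src/library-processer.py | _css_decl_map
-- ===== SOURCE A (Python) =====
-- def _css_decl_map(decl_text: str) -> dict[str, str]:
--     out: dict[str, str] = {}
--     for part in (decl_text or "").split(";"):
--         if ":" not in part:
--             continue
--         k, v = part.split(":", 1)
--         kk = k.strip().lower()
--         vv = v.strip()
--         if kk:
--             out[kk] = vv
--     return out
-- ===== SOURCE B (Python) =====
-- def _css_decl_map(decl_text: str) -> dict[str, str]:
--     # Single-pass character state machine instead of split(';')/split(':',1):
--     # accumulate a buffer; first ':' fixes the key, ';' flushes the declaration.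
--     out: dict[str, str] = {}
--     key = None
--     buf = []
--     for ch in (decl_text or ""):
--         if ch == ';':
--             if key is not None:
--                 k = key.strip().lower()
--                 if k:
--                     out[k] = ''.join(buf).strip()
--             key = None
--             buf = []
--         elif ch == ':' and key is None:
--             key = ''.join(buf)
--             buf = []
--         else:
--             buf.append(ch)
--     if key is not None:
--         k = key.strip().lower()
--         if k:
--             out[k] = ''.join(buf).strip()
--     return out
-- ===== Notes on version B (the rewrite author's own statement) =====
-- stated objective: alternative
-- what changed: Replaced split(';') plus per-part split(':',1) with a single-pass character state machine that accumulates a buffer, fixes the key at the first ':' and flushes a declaration at each ';'.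
import Mathlib
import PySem

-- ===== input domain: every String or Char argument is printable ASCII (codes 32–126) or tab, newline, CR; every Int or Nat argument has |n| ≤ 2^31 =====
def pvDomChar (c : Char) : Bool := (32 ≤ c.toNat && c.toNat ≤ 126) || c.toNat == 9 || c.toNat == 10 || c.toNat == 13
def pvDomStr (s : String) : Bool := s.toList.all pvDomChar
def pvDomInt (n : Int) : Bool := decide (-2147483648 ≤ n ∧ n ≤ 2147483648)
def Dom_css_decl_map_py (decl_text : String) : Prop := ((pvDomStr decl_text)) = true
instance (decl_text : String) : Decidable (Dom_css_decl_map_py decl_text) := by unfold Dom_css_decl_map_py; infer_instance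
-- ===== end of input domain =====

-- B replaces split(';')/split(':',1) with a single-pass character state machine (objective: alternative).


-- ===== PORT A =====
-- (decl_text or ""): for a str argument this is decl_text itself ("" or "" = ""), so the port uses decl_text directly.
def css_decl_map_py (decl_text : String) : List (String × String) :=
  let out := (PySem.Chars.splitOn decl_text.toList [';']).foldl (fun d part =>
    if PySem.Chars.isIn [':'] part then
      match PySem.Chars.splitOnMax part [':'] 1 with
      | [k, v] =>
        let kk := PySem.Chars.lower (PySem.Chars.strip k)
        let vv := PySem.Chars.strip v
        if kk ≠ [] then d.insert (String.ofList kk) (String.ofList vv) else d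
      | _ => d   -- unreachable: split(':', 1) with ':' in part yields exactly two pieces
    else d) PySem.Dict.empty
  out.items

-- ===== PORT B =====
-- flush of one accumulated declaration (the two 'if key is not None: …' blocks of Source B)
def cssScanFlush (key? : Option (List Char)) (buf : List Char)
    (d : PySem.Dict String String) : PySem.Dict String String :=
  match key? with
  | none => d
  | some key =>
    let k := PySem.Chars.lower (PySem.Chars.strip key)
    if k ≠ [] then d.insert (String.ofList k) (String.ofList (PySem.Chars.strip buf)) else d

-- the loop body of Source B: state = (key, buf, out)
def cssScanStep (st : Option (List Char) × List Char × PySem.Dict String String) (c : Char) :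
    Option (List Char) × List Char × PySem.Dict String String :=
  if c = ';' then (none, [], cssScanFlush st.1 st.2.1 st.2.2)
  else if c = ':' ∧ st.1 = none then (some st.2.1, [], st.2.2)
  else (st.1, st.2.1 ++ [c], st.2.2)

def css_decl_map_py_alt (decl_text : String) : List (String × String) :=
  let st := decl_text.toList.foldl cssScanStep (none, [], PySem.Dict.empty)
  (cssScanFlush st.1 st.2.1 st.2.2).items

-- ===== PRECONDITION & SPEC =====
def Spec_css_decl_map_py (decl_text : String) (out : List (String × String)) : Prop := out = css_decl_map_py_alt decl_text
instance (decl_text : String) (out : List (String × String)) : Decidable (Spec_css_decl_map_py decl_text out) := by unfold Spec_css_decl_map_py; infer_instance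

-- ===== CLAIM (what is proved, stated in full; the proofs are below) =====
def Claim_equal_css_decl_map_py : Prop := ∀ (decl_text : String), Dom_css_decl_map_py decl_text → Spec_css_decl_map_py decl_text (css_decl_map_py decl_text)

-- ===== LEMMAS AND PROOFS =====

-- reference splitting of a char list at every ';'
def splitSemi : List Char → List (List Char)
  | [] => [[]]
  | c :: rest =>
    if c = ';' then [] :: splitSemi rest
    else
      match splitSemi rest with
      | [] => [[c]]
      | p :: ps => (c :: p) :: ps

theorem splitSemi_ne_nil (cs : List Char) : splitSemi cs ≠ [] := by
  cases cs with
  | nil => simp [splitSemi]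
  | cons c rest =>
    simp only [splitSemi]
    split
    · simp
    · cases h : splitSemi rest <;> simp

-- splitOn.go on the single-char separator ';' computes splitSemi
theorem splitOn_go_semi (fuel : Nat) :
    ∀ (l cur : List Char) (acc : List (List Char)), l.length < fuel →
      PySem.Chars.splitOn.go [';'] fuel l cur acc =
        acc.reverse ++ (match splitSemi l with
          | [] => []
          | p :: ps => (cur.reverse ++ p) :: ps) := by
  induction fuel with
  | zero => intro l cur acc h; omega
  | succ fuel ih =>
    intro l cur acc h
    cases l with
    | nil => simp [PySem.Chars.splitOn.go, splitSemi]
    | cons c rest =>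
      by_cases hc : c = ';'
      · subst hc
        have hpre : List.isPrefixOf [';'] (';' :: rest) = true := by simp [List.isPrefixOf]
        rw [PySem.Chars.splitOn.go]
        simp only [hpre, if_true, List.length_cons, List.drop_succ_cons, List.length_nil, List.drop_zero]
        rw [ih rest [] (List.reverse cur :: acc) (by simp at h; omega)]
        cases hs : splitSemi rest with
        | nil => exact absurd hs (splitSemi_ne_nil rest)
        | cons p ps => simp [splitSemi, hs]
      · have hpre : List.isPrefixOf [';'] (c :: rest) = false := by
          simp [List.isPrefixOf]; exact fun hh => absurd hh.symm hc
        rw [PySem.Chars.splitOn.go]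
        simp only [hpre, Bool.false_eq_true, if_false]
        rw [ih rest (c :: cur) acc (by simp at h; omega)]
        cases hs : splitSemi rest with
        | nil => exact absurd hs (splitSemi_ne_nil rest)
        | cons p ps => simp [splitSemi, hc, hs]

theorem splitOn_semi (cs : List Char) :
    PySem.Chars.splitOn cs [';'] = splitSemi cs := by
  rw [PySem.Chars.splitOn, splitOn_go_semi (cs.length + 1) cs [] [] (by omega)]
  cases hs : splitSemi cs with
  | nil => exact absurd hs (splitSemi_ne_nil cs)
  | cons p ps => simp

-- splitOnMax.go with budget 0 returns the rest as one piece
theorem splitOnMax_go_zero (fuel : Nat) (l cur : List Char) (acc : List (List Char))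
    (h : l.length < fuel) :
    PySem.Chars.splitOnMax.go [':'] fuel 0 l cur acc = acc.reverse ++ [cur.reverse ++ l] := by
  cases fuel with
  | zero => omega
  | succ fuel =>
    cases l with
    | nil => simp [PySem.Chars.splitOnMax.go]
    | cons c rest => simp [PySem.Chars.splitOnMax.go]

-- splitOnMax.go with budget 1 on a list containing ':' splits at the first ':'
theorem splitOnMax_go_one (fuel : Nat) :
    ∀ (l cur : List Char) (acc : List (List Char)), l.length < fuel → ':' ∈ l →
      PySem.Chars.splitOnMax.go [':'] fuel 1 l cur acc =
        acc.reverse ++ [cur.reverse ++ l.takeWhile (· ≠ ':'), (l.dropWhile (· ≠ ':')).tail] := by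
  induction fuel with
  | zero => intro l cur acc h; omega
  | succ fuel ih =>
    intro l cur acc h hmem
    cases l with
    | nil => simp at hmem
    | cons c rest =>
      by_cases hc : c = ':'
      · subst hc
        have hpre : List.isPrefixOf [':'] (':' :: rest) = true := by simp [List.isPrefixOf]
        rw [PySem.Chars.splitOnMax.go]
        simp only [hpre, if_true, List.length_cons, List.drop_succ_cons, List.length_nil, List.drop_zero, Nat.sub_self]
        rw [splitOnMax_go_zero fuel rest [] (List.reverse cur :: acc) (by simp at h; omega)]
        simp [List.takeWhile, List.dropWhile]
      · have hpre : List.isPrefixOf [':'] (c :: rest) = false := by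
          simp [List.isPrefixOf]; exact fun hh => absurd hh.symm hc
        have hmem' : ':' ∈ rest := by
          cases hmem with
          | head => exact absurd rfl hc
          | tail _ hh => exact hh
        rw [PySem.Chars.splitOnMax.go]
        simp only [hpre, Bool.false_eq_true, if_false, Nat.succ_ne_zero]
        rw [ih rest (c :: cur) acc (by simp at h; omega) hmem']
        simp [List.takeWhile, List.dropWhile, hc]

theorem splitOnMax_colon (p : List Char) (h : ':' ∈ p) :
    PySem.Chars.splitOnMax p [':'] 1 =
      [p.takeWhile (· ≠ ':'), (p.dropWhile (· ≠ ':')).tail] := by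
  rw [PySem.Chars.splitOnMax]
  rw [if_neg (by omega)]
  rw [show (1 : Int).toNat = 1 from rfl]
  rw [splitOnMax_go_one (p.length + 1) p [] [] (by omega) h]
  simp

-- 'sub in s' for the single character ':'
theorem isIn_colon (p : List Char) : PySem.Chars.isIn [':'] p = true ↔ ':' ∈ p := by
  rw [PySem.Chars.isIn_iff_infix]
  constructor
  · intro hh; exact hh.mem (by simp)
  · intro hh
    rcases List.mem_iff_append.mp hh with ⟨s, t, rfl⟩
    exact ⟨s, t, by simp⟩

-- the key/buffer transition of B's loop for a non-';' character
def cssStep1 (kb : Option (List Char) × List Char) (c : Char) : Option (List Char) × List Char :=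
  if c = ':' ∧ kb.1 = none then (some kb.2, []) else (kb.1, kb.2 ++ [c])

theorem foldl_step1_some (p : List Char) : ∀ (k b : List Char),
    p.foldl cssStep1 (some k, b) = (some k, b ++ p) := by
  induction p with
  | nil => simp
  | cons c rest ih => intro k b; simp [cssStep1, ih]

theorem foldl_step1_no_colon (p : List Char) (h : ':' ∉ p) : ∀ (b : List Char),
    p.foldl cssStep1 (none, b) = (none, b ++ p) := by
  induction p with
  | nil => simp
  | cons c rest ih =>
    intro b
    have hc : c ≠ ':' := fun hh => h (hh ▸ List.mem_cons_self)
    have hrest : ':' ∉ rest := fun hh => h (List.mem_cons_of_mem _ hh)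
    simp only [List.foldl_cons, cssStep1, hc, false_and, if_false]
    rw [ih hrest]
    simp

theorem foldl_step1_colon (p : List Char) (h : ':' ∈ p) : ∀ (b : List Char),
    p.foldl cssStep1 (none, b) =
      (some (b ++ p.takeWhile (· ≠ ':')), (p.dropWhile (· ≠ ':')).tail) := by
  induction p with
  | nil => simp at h
  | cons c rest ih =>
    intro b
    by_cases hc : c = ':'
    · subst hc
      have hstep : cssStep1 (none, b) ':' = (some b, []) := by simp [cssStep1]
      simp only [List.foldl_cons, hstep]
      rw [foldl_step1_some]
      simp [List.takeWhile, List.dropWhile]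
    · have hrest : ':' ∈ rest := by
        cases h with
        | head => exact absurd rfl hc
        | tail _ hh => exact hh
      simp only [List.foldl_cons, cssStep1, hc, false_and, if_false]
      rw [ih hrest]
      simp [List.takeWhile, List.dropWhile, hc]

-- processing one ';'-free declaration from a fresh state, B-style
def cssRunPart (d : PySem.Dict String String) (p : List Char) : PySem.Dict String String :=
  let kb := p.foldl cssStep1 (none, [])
  cssScanFlush kb.1 kb.2 d

-- A's loop body equals B's fresh-state part processing
theorem stepA_eq_runPart (d : PySem.Dict String String) (p : List Char) :
    (if PySem.Chars.isIn [':'] p then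
      match PySem.Chars.splitOnMax p [':'] 1 with
      | [k, v] =>
        let kk := PySem.Chars.lower (PySem.Chars.strip k)
        let vv := PySem.Chars.strip v
        if kk ≠ [] then d.insert (String.ofList kk) (String.ofList vv) else d
      | _ => d
    else d) = cssRunPart d p := by
  by_cases h : ':' ∈ p
  · rw [if_pos ((isIn_colon p).mpr h), splitOnMax_colon p h]
    unfold cssRunPart
    rw [foldl_step1_colon p h]
    simp [cssScanFlush]
  · rw [if_neg (fun hh => h ((isIn_colon p).mp hh))]
    unfold cssRunPart
    rw [foldl_step1_no_colon p h]
    simp [cssScanFlush]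

-- the scanner over cs from an arbitrary mid-declaration state equals part-by-part processing
theorem scan_eq_parts (cs : List Char) : ∀ (k? : Option (List Char)) (b : List Char)
    (d : PySem.Dict String String),
    cssScanFlush (cs.foldl cssScanStep (k?, b, d)).1 (cs.foldl cssScanStep (k?, b, d)).2.1
      (cs.foldl cssScanStep (k?, b, d)).2.2 =
      (match splitSemi cs with
       | [] => d
       | p :: ps =>
         ps.foldl cssRunPart
           (let kb := p.foldl cssStep1 (k?, b)
            cssScanFlush kb.1 kb.2 d)) := by
  induction cs with
  | nil => intro k? b d; simp [splitSemi]
  | cons c rest ih =>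
    intro k? b d
    by_cases hc : c = ';'
    · subst hc
      have hstep : cssScanStep (k?, b, d) ';' = (none, [], cssScanFlush k? b d) := by
        simp [cssScanStep]
      simp only [List.foldl_cons, hstep]
      rw [ih none [] (cssScanFlush k? b d)]
      cases hs : splitSemi rest with
      | nil => exact absurd hs (splitSemi_ne_nil rest)
      | cons p ps =>
        simp [splitSemi, hs, cssRunPart, cssScanFlush]
    · have hstep : cssScanStep (k?, b, d) c = (cssStep1 (k?, b) c |>.1, cssStep1 (k?, b) c |>.2, d) := by
        simp only [cssScanStep, cssStep1, hc, if_false]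
        split <;> rfl
      simp only [List.foldl_cons, hstep]
      rw [ih]
      cases hs : splitSemi rest with
      | nil => exact absurd hs (splitSemi_ne_nil rest)
      | cons p ps =>
        simp [splitSemi, hc, hs]

-- ===== VERDICT (by name: the statement is the Claim_ definition above) =====
theorem css_decl_map_py_spec : Claim_equal_css_decl_map_py := by
  intro decl_text _
  unfold Spec_css_decl_map_py
  simp only [css_decl_map_py, css_decl_map_py_alt]
  rw [scan_eq_parts]
  rw [splitOn_semi]
  congr 1
  cases hs : splitSemi decl_text.toList with
  | nil => exact absurd hs (splitSemi_ne_nil decl_text.toList)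
  | cons p ps =>
    have hf : (fun (d : PySem.Dict String String) (part : List Char) =>
        if PySem.Chars.isIn [':'] part then
          match PySem.Chars.splitOnMax part [':'] 1 with
          | [k, v] =>
            let kk := PySem.Chars.lower (PySem.Chars.strip k)
            let vv := PySem.Chars.strip v
            if kk ≠ [] then d.insert (String.ofList kk) (String.ofList vv) else d
          | _ => d
        else d) = cssRunPart := by
      funext d q
      exact stepA_eq_runPart d q
    rw [hf]
    simp [cssRunPart]
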